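-- pv_equiv track=rewrite | github.com/yoonsunho/algorithm | aps-advanced/day7/swea/4366.py | thr_to_dec
-- ===== SOURCE A (Python) =====
-- def thr_to_dec(n):
--     dec_num = 0
--     pow = 0
--
--     for x in n[::-1]:
--         if x == 1 or x == 2:
--             dec_num += x*(3**pow)
--         pow += 1
--
--     return dec_num
-- ===== SOURCE B (Python) =====
-- def thr_to_dec(n):
--     dec_num = 0
--     for x in n:
--         dec_num = dec_num * 3 + (x if x == 1 or x == 2 else 0)
--     return dec_num
-- ===== Notes on version B (the rewrite author's own statement) =====
-- stated objective: idiomatic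
-- what changed: Replaced the reversed traversal with an explicit power accumulator and 3**pow exponentiation by a single forward-order Horner multiply-accumulate pass with no power variable.
import Mathlib
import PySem

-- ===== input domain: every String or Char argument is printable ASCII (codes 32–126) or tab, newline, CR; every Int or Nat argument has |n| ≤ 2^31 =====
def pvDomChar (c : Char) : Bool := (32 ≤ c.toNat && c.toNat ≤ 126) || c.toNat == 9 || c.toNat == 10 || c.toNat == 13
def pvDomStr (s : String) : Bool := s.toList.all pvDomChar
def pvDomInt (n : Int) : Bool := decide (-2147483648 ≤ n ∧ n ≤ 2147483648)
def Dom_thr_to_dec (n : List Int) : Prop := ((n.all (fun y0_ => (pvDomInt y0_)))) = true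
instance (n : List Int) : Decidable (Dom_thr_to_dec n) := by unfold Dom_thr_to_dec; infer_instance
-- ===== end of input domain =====

-- B replaces the reversed-order loop with a power accumulator by a forward Horner multiply-accumulate pass (idiomatic; same cost).
-- ===== PORT A =====
def thr_to_dec (n : List Int) : Int :=
  (n.reverse.foldl
    (fun (s : Int × Nat) x =>
      ((if x = 1 ∨ x = 2 then s.1 + x * 3 ^ s.2 else s.1), s.2 + 1))
    (0, 0)).1

-- ===== PORT B =====
-- Horner's method: forward pass, multiply-accumulate, no power variable.
def thr_to_dec_alt (n : List Int) : Int :=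
  n.foldl (fun d x => d * 3 + (if x = 1 ∨ x = 2 then x else 0)) 0

-- ===== PRECONDITION & SPEC =====
def Spec_thr_to_dec (n : List Int) (out : Int) : Prop := out = thr_to_dec_alt n
instance (n : List Int) (out : Int) : Decidable (Spec_thr_to_dec n out) := by unfold Spec_thr_to_dec; infer_instance

-- ===== CLAIM (what is proved, stated in full; the proofs are below) =====
def Claim_equal_thr_to_dec : Prop := ∀ (n : List Int), Dom_thr_to_dec n → Spec_thr_to_dec n (thr_to_dec n)

-- ===== LEMMAS AND PROOFS =====

theorem pv_stepB_append (l : List Int) (x : Int) :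
    (l ++ [x]).foldl (fun d y => d * 3 + (if y = 1 ∨ y = 2 then y else 0)) 0
      = (l.foldl (fun d y => d * 3 + (if y = 1 ∨ y = 2 then y else 0)) 0) * 3
        + (if x = 1 ∨ x = 2 then x else 0) := by
  simp [List.foldl_append]

theorem pv_key (l : List Int) (d : Int) (p : Nat) :
    (l.foldl
      (fun (s : Int × Nat) x =>
        ((if x = 1 ∨ x = 2 then s.1 + x * 3 ^ s.2 else s.1), s.2 + 1))
      (d, p)).1
    = d + 3 ^ p *
        (l.reverse.foldl (fun a y => a * 3 + (if y = 1 ∨ y = 2 then y else 0)) 0) := by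
  induction l generalizing d p with
  | nil => simp
  | cons x xs ih =>
    simp only [List.foldl_cons, List.reverse_cons]
    rw [ih, pv_stepB_append]
    split_ifs with h
    · ring
    · ring


-- ===== VERDICT (by name: the statement is the Claim_ definition above) =====
theorem thr_to_dec_spec : Claim_equal_thr_to_dec := by
  intro n _
  unfold Spec_thr_to_dec thr_to_dec thr_to_dec_alt
  rw [pv_key]
  simp
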